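-- pv_equiv track=rewrite | github.com/kguzek/coursework-wust | sysop/lab4/strategies/base.py | normalize_allocations
-- ===== SOURCE A (Python) =====
-- def normalize_allocations(allocations, total_frames):
--     while sum(allocations.values()) > total_frames:
--         max_pid = max(allocations, key=allocations.get)
--         if allocations[max_pid] > 1:
--             allocations[max_pid] -= 1
--         else:
--             break
--     while sum(allocations.values()) < total_frames:
--         min_pid = min(allocations, key=allocations.get)
--         allocations[min_pid] += 1
--     return allocations
-- ===== SOURCE B (Python) =====
-- def normalize_allocations(allocations, total_frames):
--     # Water-leveling computed in closed form: one sum + a binary search on the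
--     # level instead of one unit transfer per loop iteration.
--     if not allocations:
--         return allocations
--     s = sum(allocations.values())
--     vals = list(allocations.values())
--     if s > total_frames:
--         e = s - total_frames
--
--         def cap(m):  # frames recoverable by draining every value down to m
--             return sum(v - m for v in vals if v > m)
--
--         if cap(1) <= e:
--             # not enough surplus above the floor of 1: drain everything to 1
--             for pid, v in allocations.items():
--                 if v > 1:
--                     allocations[pid] = 1
--             return allocations
--         lo, hi = 1, max(vals)  # cap(lo) > e >= 0 = cap(hi)
--         while hi - lo > 1:
--             mid = (lo + hi) // 2
--             if cap(mid) <= e: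
--                 hi = mid
--             else:
--                 lo = mid
--         M = hi  # smallest level with cap(M) <= e; M >= 2
--         r = e - cap(M)  # extra single steps below M, first pids in dict order
--         for pid, v in allocations.items():
--             if v >= M:
--                 if r > 0:
--                     allocations[pid] = M - 1
--                     r -= 1
--                 else:
--                     allocations[pid] = M
--     elif s < total_frames:
--         d = total_frames - s
--
--         def fill(level):  # frames needed to raise every value up to level
--             return sum(level - v for v in vals if v < level)
--
--         lo, hi = min(vals), min(vals) + d + 1  # fill(lo) = 0 <= d < fill(hi)
--         while hi - lo > 1:
--             mid = (lo + hi) // 2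
--             if fill(mid) <= d:
--                 lo = mid
--             else:
--                 hi = mid
--         L = lo  # largest level with fill(L) <= d
--         r = d - fill(L)  # extra single steps above L, first pids in dict order
--         for pid, v in allocations.items():
--             if v <= L:
--                 if r > 0:
--                     allocations[pid] = L + 1
--                     r -= 1
--                 else:
--                     allocations[pid] = L
--     return allocations
-- ===== Notes on version B (the rewrite author's own statement) =====
-- stated objective: faster
-- what changed: A transfers one frame per loop iteration (O(n) sum + max/min scan each time); B computes the final water level in closed form with one sum and a binary search on the level, then rewrites the dict in a single pass, distributing the remainder to the first pids in dict order.
import Mathlib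
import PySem

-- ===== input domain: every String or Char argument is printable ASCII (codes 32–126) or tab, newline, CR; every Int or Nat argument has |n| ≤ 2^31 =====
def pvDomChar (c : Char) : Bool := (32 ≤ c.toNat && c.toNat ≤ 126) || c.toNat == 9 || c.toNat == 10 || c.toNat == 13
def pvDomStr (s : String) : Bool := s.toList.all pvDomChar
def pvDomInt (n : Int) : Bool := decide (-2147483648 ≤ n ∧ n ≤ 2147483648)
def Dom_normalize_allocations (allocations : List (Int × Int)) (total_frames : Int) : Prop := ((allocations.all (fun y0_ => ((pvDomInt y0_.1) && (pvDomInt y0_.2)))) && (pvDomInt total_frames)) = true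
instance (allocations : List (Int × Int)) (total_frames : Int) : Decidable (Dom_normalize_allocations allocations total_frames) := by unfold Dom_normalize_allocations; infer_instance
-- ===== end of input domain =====

-- B replaces A's one-frame-per-iteration leveling loops by a closed-form level
-- found with a binary search plus one rewriting pass (measurably faster; both
-- Pythons mutate the dict in place the same way, equivalence is about the value).


-- ===== PORT A =====
-- the dict is the association list (keys unique under Pre_); sum(allocations.values())
def pvSumVals (d : List (Int × Int)) : Int := (d.map Prod.snd).sum

-- max(allocations, key=allocations.get): first pair with maximal value (exact: dict keys are unique)
def pvMaxBy : List (Int × Int) → Option (Int × Int)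
  | [] => none
  | p :: t =>
    match pvMaxBy t with
    | none => some p
    | some q => if q.2 > p.2 then some q else some p

-- min(allocations, key=allocations.get): first pair with minimal value
def pvMinBy : List (Int × Int) → Option (Int × Int)
  | [] => none
  | p :: t =>
    match pvMinBy t with
    | none => some p
    | some q => if q.2 < p.2 then some q else some p

-- allocations[k] = f(allocations[k]) : rewrite the (under Pre_ unique) pair with key k
def pvModify (k : Int) (f : Int → Int) : List (Int × Int) → List (Int × Int)
  | [] => []
  | p :: t => if p.1 = k then (k, f p.2) :: t else p :: pvModify k f t

lemma pvMaxBy_mem : ∀ {d : List (Int × Int)} {q : Int × Int}, pvMaxBy d = some q → q ∈ d := by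
  intro d
  induction d with
  | nil => intro q h; simp [pvMaxBy] at h
  | cons p t ih =>
    intro q h
    simp only [pvMaxBy] at h
    cases hm : pvMaxBy t with
    | none => rw [hm] at h; simp at h; simp [h]
    | some q' =>
      rw [hm] at h
      by_cases hc : q'.2 > p.2 <;> simp [hc] at h
      · right; exact h ▸ ih hm
      · simp [h]

lemma pvMinBy_mem : ∀ {d : List (Int × Int)} {q : Int × Int}, pvMinBy d = some q → q ∈ d := by
  intro d
  induction d with
  | nil => intro q h; simp [pvMinBy] at h
  | cons p t ih =>
    intro q h
    simp only [pvMinBy] at h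
    cases hm : pvMinBy t with
    | none => rw [hm] at h; simp at h; simp [h]
    | some q' =>
      rw [hm] at h
      by_cases hc : q'.2 < p.2 <;> simp [hc] at h
      · right; exact h ▸ ih hm
      · simp [h]

-- the sum moves by one when a present key is decremented/incremented:
lemma pvSumVals_modify_sub {d : List (Int × Int)} {k : Int} (h : k ∈ d.map Prod.fst) :
    pvSumVals (pvModify k (fun v => v - 1) d) = pvSumVals d - 1 := by
  induction d with
  | nil => simp at h
  | cons p t ih =>
    by_cases hp : p.1 = k
    · simp [pvModify, hp, pvSumVals]; ring
    · rw [List.map_cons, List.mem_cons] at h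
      rcases h with h | h
      · exact absurd h.symm hp
      · have ih2 := ih h
        simp [pvModify, hp, pvSumVals] at ih2 ⊢
        omega

lemma pvSumVals_modify_add {d : List (Int × Int)} {k : Int} (h : k ∈ d.map Prod.fst) :
    pvSumVals (pvModify k (fun v => v + 1) d) = pvSumVals d + 1 := by
  induction d with
  | nil => simp at h
  | cons p t ih =>
    by_cases hp : p.1 = k
    · simp [pvModify, hp, pvSumVals]; ring
    · rw [List.map_cons, List.mem_cons] at h
      rcases h with h | h
      · exact absurd h.symm hp
      · have ih2 := ih h
        simp [pvModify, hp, pvSumVals] at ih2 ⊢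
        omega

-- first while loop: drain the running maximum
def pvPhase1 (d : List (Int × Int)) (total : Int) : List (Int × Int) :=
  if pvSumVals d > total then
    match h : pvMaxBy d with
    | none => d          -- Python: max() of an empty dict raises ValueError (outside Pre_)
    | some q =>
      if q.2 > 1 then pvPhase1 (pvModify q.1 (fun v => v - 1) d) total else d
  else d
termination_by (pvSumVals d - total).toNat
decreasing_by
  have hk : q.1 ∈ d.map Prod.fst := List.mem_map_of_mem (pvMaxBy_mem h)
  have := pvSumVals_modify_sub hk
  omega

-- second while loop: feed the running minimum
def pvPhase2 (d : List (Int × Int)) (total : Int) : List (Int × Int) :=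
  if pvSumVals d < total then
    match h : pvMinBy d with
    | none => d          -- Python: min() of an empty dict raises ValueError (outside Pre_)
    | some q => pvPhase2 (pvModify q.1 (fun v => v + 1) d) total
  else d
termination_by (total - pvSumVals d).toNat
decreasing_by
  have hk : q.1 ∈ d.map Prod.fst := List.mem_map_of_mem (pvMinBy_mem h)
  have := pvSumVals_modify_add hk
  omega

def normalize_allocations (allocations : List (Int × Int)) (total_frames : Int) : List (Int × Int) :=
  pvPhase2 (pvPhase1 allocations total_frames) total_frames

-- ===== PORT B =====
-- cap(m) = sum(v - m for v in vals if v > m)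
def pvCap (vs : List Int) (m : Int) : Int := (vs.map (fun v => if v > m then v - m else 0)).sum
-- fill(L) = sum(L - v for v in vals if v < L)
def pvFill (vs : List Int) (L : Int) : Int := (vs.map (fun v => if v < L then L - v else 0)).sum
-- max(vals) / min(vals); only called on a nonempty list in B
def pvMaxV : List Int → Int
  | [] => 0
  | v :: t => t.foldl max v
def pvMinV : List Int → Int
  | [] => 0
  | v :: t => t.foldl min v

-- binary search: smallest M in (lo, hi] with cap(M) <= e, given cap(lo) > e >= cap(hi)
def pvSearchM (vs : List Int) (e lo hi : Int) : Int :=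
  if hi - lo ≤ 1 then hi
  else
    let mid := PySem.Int.floordiv (lo + hi) 2
    if pvCap vs mid ≤ e then pvSearchM vs e lo mid else pvSearchM vs e mid hi
termination_by (hi - lo).toNat
decreasing_by
  all_goals
    have h2 : PySem.Int.floordiv (lo + hi) 2 = (lo + hi) / 2 :=
      PySem.Int.floordiv_eq_ediv_of_pos (by norm_num)
    rw [h2]; omega

-- binary search: largest L in [lo, hi) with fill(L) <= dlt, given fill(lo) <= dlt < fill(hi)
def pvSearchL (vs : List Int) (dlt lo hi : Int) : Int :=
  if hi - lo ≤ 1 then lo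
  else
    let mid := PySem.Int.floordiv (lo + hi) 2
    if pvFill vs mid ≤ dlt then pvSearchL vs dlt mid hi else pvSearchL vs dlt lo mid
termination_by (hi - lo).toNat
decreasing_by
  all_goals
    have h2 : PySem.Int.floordiv (lo + hi) 2 = (lo + hi) / 2 :=
      PySem.Int.floordiv_eq_ediv_of_pos (by norm_num)
    rw [h2]; omega

-- final drain pass: values >= M become M, except the first r of them become M - 1
def pvApplyDrain : List (Int × Int) → Int → Int → List (Int × Int)
  | [], _, _ => []
  | p :: t, M, r =>
    if p.2 ≥ M then
      if r > 0 then (p.1, M - 1) :: pvApplyDrain t M (r - 1)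
      else (p.1, M) :: pvApplyDrain t M r
    else p :: pvApplyDrain t M r

-- final fill pass: values <= L become L, except the first r of them become L + 1
def pvApplyFill : List (Int × Int) → Int → Int → List (Int × Int)
  | [], _, _ => []
  | p :: t, L, r =>
    if p.2 ≤ L then
      if r > 0 then (p.1, L + 1) :: pvApplyFill t L (r - 1)
      else (p.1, L) :: pvApplyFill t L r
    else p :: pvApplyFill t L r

def normalize_allocations_alt (allocations : List (Int × Int)) (total_frames : Int) : List (Int × Int) :=
  if allocations = [] then allocations
  else
    let s := pvSumVals allocations
    let vs := allocations.map Prod.snd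
    if s > total_frames then
      let e := s - total_frames
      if pvCap vs 1 ≤ e then
        allocations.map (fun p => (p.1, if p.2 > 1 then 1 else p.2))
      else
        let M := pvSearchM vs e 1 (pvMaxV vs)
        pvApplyDrain allocations M (e - pvCap vs M)
    else if s < total_frames then
      let dlt := total_frames - s
      let L := pvSearchL vs dlt (pvMinV vs) (pvMinV vs + dlt + 1)
      pvApplyFill allocations L (dlt - pvFill vs L)
    else allocations

-- ===== PRECONDITION & SPEC =====
-- Pre_ excludes (a) the empty dict with total_frames ≠ 0, where Python A raises
-- ValueError (max()/min() of an empty sequence), and (b) association lists with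
-- duplicate keys, which cannot arise from a Python dict.
def Pre_normalize_allocations (allocations : List (Int × Int)) (total_frames : Int) : Prop :=
  (allocations.map Prod.fst).Nodup ∧ (allocations = [] → total_frames = 0)
instance (allocations : List (Int × Int)) (total_frames : Int) : Decidable (Pre_normalize_allocations allocations total_frames) := by unfold Pre_normalize_allocations; infer_instance

def pvWitness_normalize_allocations : (List (Int × Int)) × Int := ([(1, 5), (2, 1), (3, 2)], 4)

def Spec_normalize_allocations (allocations : List (Int × Int)) (total_frames : Int) (out : List (Int × Int)) : Prop := out = normalize_allocations_alt allocations total_frames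
instance (allocations : List (Int × Int)) (total_frames : Int) (out : List (Int × Int)) : Decidable (Spec_normalize_allocations allocations total_frames out) := by unfold Spec_normalize_allocations; infer_instance

-- ===== CLAIM (what is proved, stated in full; the proofs are below) =====
def Claim_equal_normalize_allocations : Prop := ∀ (allocations : List (Int × Int)) (total_frames : Int), Dom_normalize_allocations allocations total_frames → Pre_normalize_allocations allocations total_frames → Spec_normalize_allocations allocations total_frames (normalize_allocations allocations total_frames)


-- ===== LEMMAS AND PROOFS =====


-- ---------- generic facts about pvCap ----------
lemma pvCap_cons (v : Int) (vs : List Int) (m : Int) :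
    pvCap (v :: vs) m = (if v > m then v - m else 0) + pvCap vs m := by
  simp [pvCap]

lemma pvCap_append (a b : List Int) (m : Int) :
    pvCap (a ++ b) m = pvCap a m + pvCap b m := by
  simp [pvCap]

lemma pvCap_nonneg (vs : List Int) (m : Int) : 0 ≤ pvCap vs m := by
  induction vs with
  | nil => simp [pvCap]
  | cons v t ih => rw [pvCap_cons]; split_ifs <;> omega

lemma pvCap_antitone (vs : List Int) {m m' : Int} (h : m ≤ m') : pvCap vs m' ≤ pvCap vs m := by
  induction vs with
  | nil => simp [pvCap]
  | cons v t ih => rw [pvCap_cons, pvCap_cons]; split_ifs <;> omega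

lemma pvCap_le_zero_iff (vs : List Int) (m : Int) : pvCap vs m ≤ 0 ↔ ∀ v ∈ vs, v ≤ m := by
  induction vs with
  | nil => simp [pvCap]
  | cons v t ih =>
    rw [pvCap_cons]
    have := pvCap_nonneg t m
    constructor
    · intro h x hx
      rcases List.mem_cons.1 hx with rfl | hx
      · split_ifs at h <;> omega
      · exact ih.1 (by split_ifs at h <;> omega) x hx
    · intro h
      have h1 : v ≤ m := h v (List.mem_cons_self ..)
      have h2 : pvCap t m ≤ 0 := ih.2 (fun x hx => h x (List.mem_cons_of_mem _ hx))
      split_ifs <;> omega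

lemma pvCap_split (l1 l2 : List (Int × Int)) (k x m : Int) :
    pvCap ((l1 ++ (k, x) :: l2).map Prod.snd) m =
      pvCap (l1.map Prod.snd) m + (if x > m then x - m else 0) + pvCap (l2.map Prod.snd) m := by
  rw [List.map_append, pvCap_append, List.map_cons, pvCap_cons]
  ring

-- ---------- max of the value list ----------
lemma pvMaxV_ge {vs : List Int} (h : vs ≠ []) : ∀ x ∈ vs, x ≤ pvMaxV vs := by
  cases vs with
  | nil => simp at h
  | cons v t =>
    intro x hx
    have := PySem.List.le_foldl_max t v
    rcases List.mem_cons.1 hx with rfl | hx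
    · exact this.1
    · exact this.2 x hx

lemma pvMaxV_mem {vs : List Int} (h : vs ≠ []) : pvMaxV vs ∈ vs := by
  cases vs with
  | nil => simp at h
  | cons v t =>
    have := PySem.List.foldl_max_mem t v
    rcases this with h1 | h1
    · simp [pvMaxV, h1]
    · simp [pvMaxV]; right; exact h1

lemma pvCap_maxV (vs : List Int) (h : vs ≠ []) : pvCap vs (pvMaxV vs) = 0 := by
  have h1 := (pvCap_le_zero_iff vs (pvMaxV vs)).2 (pvMaxV_ge h)
  have := pvCap_nonneg vs (pvMaxV vs)
  omega

lemma pvMaxV_ge_two {vs : List Int} (h : 0 < pvCap vs 1) : 1 < pvMaxV vs := by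
  have hne : vs ≠ [] := by rintro rfl; simp [pvCap] at h
  by_contra hc
  have := (pvCap_le_zero_iff vs 1).2 (fun v hv => le_trans (pvMaxV_ge hne v hv) (by omega))
  omega

-- ---------- the binary search for the drain level ----------
lemma pvSearchM_spec (vs : List Int) (e : Int) :
    ∀ (n : ℕ) (lo hi : Int), (hi - lo).toNat ≤ n → e < pvCap vs lo → pvCap vs hi ≤ e → lo < hi →
      pvCap vs (pvSearchM vs e lo hi) ≤ e ∧ e < pvCap vs (pvSearchM vs e lo hi - 1) ∧
      lo < pvSearchM vs e lo hi ∧ pvSearchM vs e lo hi ≤ hi := by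
  intro n
  induction n with
  | zero =>
    intro lo hi hn hlo hhi hlt
    omega
  | succ n ih =>
    intro lo hi hn hlo hhi hlt
    rw [pvSearchM]
    by_cases hba : hi - lo ≤ 1
    · have hhi1 : hi = lo + 1 := by omega
      simp only [hba, if_true]
      refine ⟨hhi, ?_, by omega, le_refl _⟩
      rw [hhi1]; simpa using hlo
    · simp only [hba, if_false]
      have hmid : PySem.Int.floordiv (lo + hi) 2 = (lo + hi) / 2 :=
        PySem.Int.floordiv_eq_ediv_of_pos (by norm_num)
      rw [hmid]
      have hb1 : lo < (lo + hi) / 2 := by omega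
      have hb2 : (lo + hi) / 2 < hi := by omega
      by_cases hc : pvCap vs ((lo + hi) / 2) ≤ e
      · simp only [hc, if_true]
        have := ih lo ((lo + hi) / 2) (by omega) hlo hc hb1
        exact ⟨this.1, this.2.1, this.2.2.1, by omega⟩
      · simp only [hc, if_false]
        have := ih ((lo + hi) / 2) hi (by omega) (by omega) hhi hb2
        exact ⟨this.1, this.2.1, by omega, this.2.2.2⟩

lemma pvCapBoundary_unique (vs : List Int) (e M1 M2 : Int)
    (h1 : pvCap vs M1 ≤ e) (h1' : e < pvCap vs (M1 - 1))
    (h2 : pvCap vs M2 ≤ e) (h2' : e < pvCap vs (M2 - 1)) : M1 = M2 := by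
  rcases lt_trichotomy M1 M2 with h | h | h
  · have := pvCap_antitone vs (show M1 ≤ M2 - 1 by omega)
    omega
  · exact h
  · have := pvCap_antitone vs (show M2 ≤ M1 - 1 by omega)
    omega

-- ---------- the final passes ----------
def pvFloorMap (d : List (Int × Int)) : List (Int × Int) :=
  d.map (fun p => (p.1, if p.2 > 1 then 1 else p.2))

lemma pvFloorMap_id {d : List (Int × Int)} (h : ∀ p ∈ d, p.2 ≤ 1) : pvFloorMap d = d := by
  induction d with
  | nil => rfl
  | cons p t ih =>
    have hp := h p (List.mem_cons_self ..)
    simp only [pvFloorMap, List.map_cons]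
    rw [if_neg (by omega)]
    have := ih (fun q hq => h q (List.mem_cons_of_mem _ hq))
    simp only [pvFloorMap] at this
    rw [this]

lemma pvFloorMap_mid (l1 l2 : List (Int × Int)) (k x y : Int) (hx : 1 < x) (hy : 1 ≤ y) :
    pvFloorMap (l1 ++ (k, x) :: l2) = pvFloorMap (l1 ++ (k, y) :: l2) := by
  simp only [pvFloorMap, List.map_append, List.map_cons]
  rw [if_pos hx]
  have : (if y > 1 then (1 : Int) else y) = 1 := by split_ifs <;> omega
  rw [this]

lemma pvApplyDrain_congr_mid (l1 l2 : List (Int × Int)) (k x y M : Int)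
    (hx : x ≥ M) (hy : y ≥ M) :
    ∀ r, pvApplyDrain (l1 ++ (k, x) :: l2) M r = pvApplyDrain (l1 ++ (k, y) :: l2) M r := by
  induction l1 with
  | nil =>
    intro r
    simp only [List.nil_append, pvApplyDrain]
    rw [if_pos hx, if_pos hy]
  | cons p t ih =>
    intro r
    simp only [List.cons_append, pvApplyDrain]
    split_ifs <;> rw [ih]

lemma pvApplyDrain_firstmax (l2 : List (Int × Int)) (k M : Int) :
    ∀ (l1 : List (Int × Int)) (r : Int), (∀ p ∈ l1, p.2 < M) → 0 < r →
      pvApplyDrain (l1 ++ (k, M) :: l2) M r = pvApplyDrain (l1 ++ (k, M - 1) :: l2) M (r - 1) := by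
  intro l1
  induction l1 with
  | nil =>
    intro r _ hr
    simp only [List.nil_append, pvApplyDrain]
    rw [if_pos (le_refl M), if_pos hr, if_neg (by omega)]
  | cons p t ih =>
    intro r h hr
    have hp := h p (List.mem_cons_self ..)
    simp only [List.cons_append, pvApplyDrain]
    rw [if_neg (by omega), if_neg (by omega), ih r (fun q hq => h q (List.mem_cons_of_mem _ hq)) hr]

lemma pvApplyDrain_id {d : List (Int × Int)} {M r : Int} (h : ∀ p ∈ d, p.2 ≤ M) (hr : r ≤ 0) :
    pvApplyDrain d M r = d := by
  induction d with
  | nil => rfl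
  | cons p t ih =>
    have hp := h p (List.mem_cons_self ..)
    have iht := ih (fun q hq => h q (List.mem_cons_of_mem _ hq))
    simp only [pvApplyDrain]
    by_cases hge : p.2 ≥ M
    · rw [if_pos hge, if_neg (by omega), iht]
      have hpM : p.2 = M := le_antisymm hp hge
      rw [← hpM]
    · rw [if_neg hge, iht]

-- ---------- structure of the first maximum ----------
lemma pvMaxBy_isMax : ∀ {d : List (Int × Int)} {q : Int × Int}, pvMaxBy d = some q → ∀ p ∈ d, p.2 ≤ q.2 := by
  intro d
  induction d with
  | nil => intro q h; simp [pvMaxBy] at h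
  | cons p t ih =>
    intro q h x hx
    simp only [pvMaxBy] at h
    cases hm : pvMaxBy t with
    | none =>
      rw [hm] at h; simp at h
      cases t with
      | nil => simp at hx; simp [hx, ← h]
      | cons a s => simp [pvMaxBy] at hm; cases hmm : pvMaxBy s <;> rw [hmm] at hm <;> simp at hm <;> split at hm <;> simp_all
    | some q' =>
      rw [hm] at h
      by_cases hc : q'.2 > p.2 <;> simp [hc] at h <;> subst h
      · rcases List.mem_cons.1 hx with rfl | hx
        · omega
        · exact ih hm x hx
      · rcases List.mem_cons.1 hx with rfl | hx
        · exact le_refl _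
        · exact le_trans (ih hm x hx) (by omega)

lemma pvMaxBy_split : ∀ {d : List (Int × Int)} {q : Int × Int}, pvMaxBy d = some q →
    ∃ l1 l2, d = l1 ++ q :: l2 ∧ (∀ p ∈ l1, p.2 < q.2) ∧ (∀ p ∈ l2, p.2 ≤ q.2) := by
  intro d
  induction d with
  | nil => intro q h; simp [pvMaxBy] at h
  | cons p t ih =>
    intro q h
    simp only [pvMaxBy] at h
    cases hm : pvMaxBy t with
    | none =>
      rw [hm] at h; simp at h
      have ht : t = [] := by
        cases t with
        | nil => rfl
        | cons a s => simp [pvMaxBy] at hm; cases hmm : pvMaxBy s <;> rw [hmm] at hm <;> simp at hm <;> split at hm <;> simp_all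
      exact ⟨[], [], by simp [ht, h], by simp, by simp [ht]⟩
    | some q' =>
      rw [hm] at h
      by_cases hc : q'.2 > p.2 <;> simp [hc] at h <;> subst h
      · obtain ⟨l1, l2, hd, h1, h2⟩ := ih hm
        exact ⟨p :: l1, l2, by simp [hd], by intro x hx; rcases List.mem_cons.1 hx with rfl | hx; omega; exact h1 x hx, h2⟩
      · exact ⟨[], t, by simp, by simp, fun x hx => le_trans (pvMaxBy_isMax hm x hx) (by omega)⟩

lemma pvMaxBy_none_iff (d : List (Int × Int)) : pvMaxBy d = none ↔ d = [] := by
  cases d with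
  | nil => simp [pvMaxBy]
  | cons p t => simp only [pvMaxBy]; cases pvMaxBy t <;> simp <;> split <;> simp

lemma pvModify_append {l1 l2 : List (Int × Int)} {k v : Int} (f : Int → Int)
    (h : k ∉ l1.map Prod.fst) :
    pvModify k f (l1 ++ (k, v) :: l2) = l1 ++ (k, f v) :: l2 := by
  induction l1 with
  | nil => simp [pvModify]
  | cons p t ih =>
    simp only [List.map_cons, List.mem_cons] at h
    push Not at h
    simp only [List.cons_append, pvModify]
    rw [if_neg (by exact fun hc => h.1 hc.symm), ih (by exact h.2)]

lemma pvModify_map_fst (k : Int) (f : Int → Int) (d : List (Int × Int)) :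
    (pvModify k f d).map Prod.fst = d.map Prod.fst := by
  induction d with
  | nil => rfl
  | cons p t ih =>
    simp only [pvModify]
    split_ifs with hp
    · simp [← hp]
    · simp [ih]


-- ---------- the drain phase in closed form ----------
def pvBodyD (d : List (Int × Int)) (e : Int) : List (Int × Int) :=
  if pvCap (d.map Prod.snd) 1 ≤ e then pvFloorMap d
  else
    pvApplyDrain d (pvSearchM (d.map Prod.snd) e 1 (pvMaxV (d.map Prod.snd)))
      (e - pvCap (d.map Prod.snd) (pvSearchM (d.map Prod.snd) e 1 (pvMaxV (d.map Prod.snd))))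

def pvDrainClosed (d : List (Int × Int)) (total : Int) : List (Int × Int) :=
  if pvSumVals d ≤ total then d else pvBodyD d (pvSumVals d - total)

lemma pvSearchM_at (vs : List Int) (e : Int) (hne : vs ≠ []) (h1 : ¬ pvCap vs 1 ≤ e) (he : 0 ≤ e) :
    pvCap vs (pvSearchM vs e 1 (pvMaxV vs)) ≤ e ∧
    e < pvCap vs (pvSearchM vs e 1 (pvMaxV vs) - 1) ∧
    1 < pvSearchM vs e 1 (pvMaxV vs) ∧ pvSearchM vs e 1 (pvMaxV vs) ≤ pvMaxV vs := by
  have hcap1 : e < pvCap vs 1 := by omega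
  have hmax2 : 1 < pvMaxV vs := pvMaxV_ge_two (by omega)
  have hmaxcap : pvCap vs (pvMaxV vs) ≤ e := by rw [pvCap_maxV vs hne]; omega
  exact pvSearchM_spec vs e (pvMaxV vs - 1).toNat 1 (pvMaxV vs) (le_refl _) hcap1 hmaxcap hmax2

lemma pvBodyD_zero {d : List (Int × Int)} (hne : d ≠ []) : pvBodyD d 0 = d := by
  have hvs : d.map Prod.snd ≠ [] := by simpa using hne
  unfold pvBodyD
  split_ifs with hc
  · refine pvFloorMap_id ?_
    intro p hp
    exact (pvCap_le_zero_iff _ 1).1 hc p.2 (List.mem_map_of_mem hp)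
  · obtain ⟨hM1, hM2, hM3, hM4⟩ := pvSearchM_at _ 0 hvs hc (le_refl 0)
    have hz := pvCap_nonneg (d.map Prod.snd) (pvSearchM (d.map Prod.snd) 0 1 (pvMaxV (d.map Prod.snd)))
    refine pvApplyDrain_id ?_ (by omega)
    intro p hp
    exact (pvCap_le_zero_iff _ _).1 (by omega) p.2 (List.mem_map_of_mem hp)

lemma pvBodyD_break {d : List (Int × Int)} {e : Int} (he : 0 ≤ e) (h : ∀ p ∈ d, p.2 ≤ 1) :
    pvBodyD d e = d := by
  unfold pvBodyD
  have hc : pvCap (d.map Prod.snd) 1 ≤ e := by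
    have := (pvCap_le_zero_iff (d.map Prod.snd) 1).2 (by
      intro v hv
      obtain ⟨p, hp, rfl⟩ := List.mem_map.1 hv
      exact h p hp)
    omega
  rw [if_pos hc]
  exact pvFloorMap_id h

lemma pvBodyD_step {d : List (Int × Int)} {k V e : Int}
    (hnd : (d.map Prod.fst).Nodup) (hmax : pvMaxBy d = some (k, V)) (hV : 1 < V) (he : 1 ≤ e) :
    pvBodyD d e = pvBodyD (pvModify k (fun v => v - 1) d) (e - 1) := by
  obtain ⟨l1, l2, hd, h1, h2⟩ := pvMaxBy_split hmax
  have hk1 : k ∉ l1.map Prod.fst := by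
    intro hk
    rw [hd, List.map_append, List.map_cons] at hnd
    exact List.disjoint_of_nodup_append hnd hk (List.mem_cons_self ..)
  have hmod : pvModify k (fun v => v - 1) d = l1 ++ (k, V - 1) :: l2 := by
    rw [hd]; exact pvModify_append _ hk1
  have hall : ∀ p ∈ d, p.2 ≤ V := pvMaxBy_isMax hmax
  have hall' : ∀ p ∈ l1 ++ (k, V - 1) :: l2, p.2 ≤ V := by
    intro p hp
    rcases List.mem_append.1 hp with hp | hp
    · exact le_of_lt (h1 p hp)
    · rcases List.mem_cons.1 hp with rfl | hp
      · omega
      · exact h2 p hp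
  have hcap : ∀ m, m ≤ V - 1 →
      pvCap ((l1 ++ (k, V - 1) :: l2).map Prod.snd) m = pvCap (d.map Prod.snd) m - 1 := by
    intro m hm
    rw [hd, pvCap_split, pvCap_split]
    split_ifs <;> omega
  rw [hmod]
  unfold pvBodyD
  have hc1 : pvCap (d.map Prod.snd) 1 ≤ e ↔ pvCap ((l1 ++ (k, V - 1) :: l2).map Prod.snd) 1 ≤ e - 1 := by
    rw [hcap 1 (by omega)]; omega
  by_cases hc : pvCap (d.map Prod.snd) 1 ≤ e
  · rw [if_pos hc, if_pos (hc1.1 hc), hd]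
    exact pvFloorMap_mid l1 l2 k V (V - 1) hV (by omega)
  · rw [if_neg hc, if_neg (fun hx => hc (hc1.2 hx))]
    have hvs : d.map Prod.snd ≠ [] := by rw [hd]; simp
    have hvs' : (l1 ++ (k, V - 1) :: l2).map Prod.snd ≠ [] := by simp
    obtain ⟨hA1, hA2, hA3, hA4⟩ := pvSearchM_at (d.map Prod.snd) e hvs hc (by omega)
    obtain ⟨hB1, hB2, hB3, hB4⟩ :=
      pvSearchM_at ((l1 ++ (k, V - 1) :: l2).map Prod.snd) (e - 1) hvs' (fun hx => hc (hc1.2 hx)) (by omega)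
    set M := pvSearchM (d.map Prod.snd) e 1 (pvMaxV (d.map Prod.snd)) with hMdef
    set M' := pvSearchM ((l1 ++ (k, V - 1) :: l2).map Prod.snd) (e - 1) 1
      (pvMaxV ((l1 ++ (k, V - 1) :: l2).map Prod.snd)) with hM'def
    have hMleV : M ≤ V := by
      have hmem := pvMaxV_mem hvs
      obtain ⟨p, hp, hpv⟩ := List.mem_map.1 hmem
      have := hall p hp
      omega
    have hcapV0 : pvCap (d.map Prod.snd) V = 0 := by
      have := (pvCap_le_zero_iff (d.map Prod.snd) V).2 (by
        intro v hv; obtain ⟨p, hp, rfl⟩ := List.mem_map.1 hv; exact hall p hp)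
      have := pvCap_nonneg (d.map Prod.snd) V
      omega
    have hcapV0' : pvCap ((l1 ++ (k, V - 1) :: l2).map Prod.snd) V = 0 := by
      have := (pvCap_le_zero_iff ((l1 ++ (k, V - 1) :: l2).map Prod.snd) V).2 (by
        intro v hv; obtain ⟨p, hp, rfl⟩ := List.mem_map.1 hv; exact hall' p hp)
      have := pvCap_nonneg ((l1 ++ (k, V - 1) :: l2).map Prod.snd) V
      omega
    have hMbound' : pvCap ((l1 ++ (k, V - 1) :: l2).map Prod.snd) M ≤ e - 1 ∧
        e - 1 < pvCap ((l1 ++ (k, V - 1) :: l2).map Prod.snd) (M - 1) := by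
      constructor
      · by_cases hMV : M ≤ V - 1
        · rw [hcap M hMV]; omega
        · have : M = V := by omega
          rw [this, hcapV0']; omega
      · rw [hcap (M - 1) (by omega)]; omega
    have huniq : M' = M :=
      pvCapBoundary_unique ((l1 ++ (k, V - 1) :: l2).map Prod.snd) (e - 1) M' M hB1 hB2
        hMbound'.1 hMbound'.2
    rw [huniq]
    by_cases hMV : M ≤ V - 1
    · rw [hcap M hMV]
      have : e - 1 - (pvCap (d.map Prod.snd) M - 1) = e - pvCap (d.map Prod.snd) M := by omega
      rw [this, hd]
      exact pvApplyDrain_congr_mid l1 l2 k V (V - 1) M (by omega) (by omega) _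
    · have hMV' : M = V := by omega
      rw [hMV', hcapV0, hcapV0', hd]
      simp only [sub_zero]
      exact pvApplyDrain_firstmax l2 k V l1 e (by simpa [hMV'] using h1) (by omega)

-- equation lemmas for the while loop of A
lemma pvPhase1_of_le {d : List (Int × Int)} {total : Int} (h : ¬ pvSumVals d > total) :
    pvPhase1 d total = d := by
  rw [pvPhase1, if_neg h]

lemma pvPhase1_of_none {d : List (Int × Int)} {total : Int} (hmb : pvMaxBy d = none) :
    pvPhase1 d total = d := by
  rw [pvPhase1]
  split_ifs with hgt
  · split
    · rfl
    · next q heq => rw [hmb] at heq; cases heq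
  · rfl

lemma pvPhase1_of_break {d : List (Int × Int)} {total : Int} {k V : Int}
    (hmb : pvMaxBy d = some (k, V)) (hV : ¬ V > 1) : pvPhase1 d total = d := by
  rw [pvPhase1]
  split_ifs with hgt
  · split
    · rfl
    · next q heq =>
        rw [hmb] at heq; injection heq with heq; subst heq
        rw [if_neg hV]
  · rfl

lemma pvPhase1_of_step {d : List (Int × Int)} {total : Int} {k V : Int}
    (hgt : pvSumVals d > total) (hmb : pvMaxBy d = some (k, V)) (hV : V > 1) :
    pvPhase1 d total = pvPhase1 (pvModify k (fun v => v - 1) d) total := by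
  conv_lhs => rw [pvPhase1]
  rw [if_pos hgt]
  split
  · next heq => rw [hmb] at heq; cases heq
  · next q heq =>
      rw [hmb] at heq; injection heq with heq; subst heq
      rw [if_pos hV]

lemma pvPhase1_eq (total : Int) :
    ∀ (n : ℕ) (d : List (Int × Int)), (pvSumVals d - total).toNat ≤ n →
      (d.map Prod.fst).Nodup → pvPhase1 d total = pvDrainClosed d total := by
  intro n
  induction n with
  | zero =>
    intro d hn _
    have hle : pvSumVals d ≤ total := by omega
    rw [pvPhase1_of_le (by omega), pvDrainClosed, if_pos hle]
  | succ n ih =>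
    intro d hn hnd
    by_cases hle : pvSumVals d ≤ total
    · rw [pvPhase1_of_le (by omega), pvDrainClosed, if_pos hle]
    · have hgt : pvSumVals d > total := by omega
      cases hmb : pvMaxBy d with
      | none =>
        have hdnil : d = [] := (pvMaxBy_none_iff d).1 hmb
        rw [pvPhase1_of_none hmb, pvDrainClosed, if_neg hle]
        exact (pvBodyD_break (by omega) (by simp [hdnil])).symm
      | some q =>
        obtain ⟨k, V⟩ := q
        by_cases hV : V > 1
        · have hk : k ∈ d.map Prod.fst := List.mem_map_of_mem (pvMaxBy_mem hmb)
          have hsum : pvSumVals (pvModify k (fun v => v - 1) d) = pvSumVals d - 1 :=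
            pvSumVals_modify_sub hk
          have hnd' : ((pvModify k (fun v => v - 1) d).map Prod.fst).Nodup := by
            rw [pvModify_map_fst]; exact hnd
          have hne' : pvModify k (fun v => v - 1) d ≠ [] := by
            intro hx
            have := pvModify_map_fst k (fun v => v - 1) d
            rw [hx] at this
            rcases d with _ | ⟨p, t⟩
            · simp [pvMaxBy] at hmb
            · simp at this
          rw [pvPhase1_of_step hgt hmb hV, ih _ (by omega) hnd']
          have hclosed' : pvDrainClosed (pvModify k (fun v => v - 1) d) total =
              pvBodyD (pvModify k (fun v => v - 1) d) (pvSumVals d - total - 1) := by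
            rw [pvDrainClosed]
            split_ifs with h2
            · have he0 : pvSumVals d - total - 1 = 0 := by omega
              rw [he0]
              exact (pvBodyD_zero hne').symm
            · have : pvSumVals (pvModify k (fun v => v - 1) d) - total = pvSumVals d - total - 1 := by
                omega
              rw [this]
          rw [hclosed', pvDrainClosed, if_neg hle]
          exact (pvBodyD_step (e := pvSumVals d - total) hnd hmb hV (by omega)).symm
        · rw [pvPhase1_of_break hmb hV, pvDrainClosed, if_neg hle]
          refine (pvBodyD_break (by omega) ?_).symm
          intro p hp
          have := pvMaxBy_isMax hmb p hp
          omega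

lemma pvSumVals_phase1_ge (total : Int) :
    ∀ (n : ℕ) (d : List (Int × Int)), (pvSumVals d - total).toNat ≤ n →
      total ≤ pvSumVals d → total ≤ pvSumVals (pvPhase1 d total) := by
  intro n
  induction n with
  | zero =>
    intro d hn hge
    rw [pvPhase1_of_le (by omega)]; omega
  | succ n ih =>
    intro d hn hge
    by_cases hle : pvSumVals d ≤ total
    · rw [pvPhase1_of_le (by omega)]; omega
    · cases hmb : pvMaxBy d with
      | none => rw [pvPhase1_of_none hmb]; omega
      | some q =>
        obtain ⟨k, V⟩ := q
        by_cases hV : V > 1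
        · have hk : k ∈ d.map Prod.fst := List.mem_map_of_mem (pvMaxBy_mem hmb)
          have hsum : pvSumVals (pvModify k (fun v => v - 1) d) = pvSumVals d - 1 :=
            pvSumVals_modify_sub hk
          rw [pvPhase1_of_step (by omega) hmb hV]
          exact ih _ (by omega) (by omega)
        · rw [pvPhase1_of_break hmb hV]; omega


-- ---------- generic facts about pvFill ----------
lemma pvFill_cons (v : Int) (vs : List Int) (L : Int) :
    pvFill (v :: vs) L = (if v < L then L - v else 0) + pvFill vs L := by
  simp [pvFill]

lemma pvFill_append (a b : List Int) (L : Int) :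
    pvFill (a ++ b) L = pvFill a L + pvFill b L := by
  simp [pvFill]

lemma pvFill_nonneg (vs : List Int) (L : Int) : 0 ≤ pvFill vs L := by
  induction vs with
  | nil => simp [pvFill]
  | cons v t ih => rw [pvFill_cons]; split_ifs <;> omega

lemma pvFill_monotone (vs : List Int) {L L' : Int} (h : L ≤ L') : pvFill vs L ≤ pvFill vs L' := by
  induction vs with
  | nil => simp [pvFill]
  | cons v t ih => rw [pvFill_cons, pvFill_cons]; split_ifs <;> omega

lemma pvFill_le_zero_iff (vs : List Int) (L : Int) : pvFill vs L ≤ 0 ↔ ∀ v ∈ vs, L ≤ v := by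
  induction vs with
  | nil => simp [pvFill]
  | cons v t ih =>
    rw [pvFill_cons]
    have := pvFill_nonneg t L
    constructor
    · intro h x hx
      rcases List.mem_cons.1 hx with rfl | hx
      · split_ifs at h <;> omega
      · exact ih.1 (by split_ifs at h <;> omega) x hx
    · intro h
      have h1 : L ≤ v := h v (List.mem_cons_self ..)
      have h2 : pvFill t L ≤ 0 := ih.2 (fun x hx => h x (List.mem_cons_of_mem _ hx))
      split_ifs <;> omega

lemma pvFill_split (l1 l2 : List (Int × Int)) (k x L : Int) :
    pvFill ((l1 ++ (k, x) :: l2).map Prod.snd) L =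
      pvFill (l1.map Prod.snd) L + (if x < L then L - x else 0) + pvFill (l2.map Prod.snd) L := by
  rw [List.map_append, pvFill_append, List.map_cons, pvFill_cons]
  ring

lemma pvFill_ge_mem {vs : List Int} {v : Int} (h : v ∈ vs) (L : Int) :
    (if v < L then L - v else 0) ≤ pvFill vs L := by
  induction vs with
  | nil => simp at h
  | cons w t ih =>
    rw [pvFill_cons]
    have ht := pvFill_nonneg t L
    rcases List.mem_cons.1 h with rfl | hx
    · omega
    · have := ih hx; split_ifs at * <;> omega

-- ---------- min of the value list ----------
lemma pvMinV_le {vs : List Int} (h : vs ≠ []) : ∀ x ∈ vs, pvMinV vs ≤ x := by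
  cases vs with
  | nil => simp at h
  | cons v t =>
    intro x hx
    have := PySem.List.foldl_min_le t v
    rcases List.mem_cons.1 hx with rfl | hx
    · exact this.1
    · exact this.2 x hx

lemma pvMinV_mem {vs : List Int} (h : vs ≠ []) : pvMinV vs ∈ vs := by
  cases vs with
  | nil => simp at h
  | cons v t =>
    have := PySem.List.foldl_min_mem t v
    rcases this with h1 | h1
    · simp [pvMinV, h1]
    · simp [pvMinV]; right; exact h1

lemma pvFill_minV (vs : List Int) (h : vs ≠ []) : pvFill vs (pvMinV vs) = 0 := by
  have h1 := (pvFill_le_zero_iff vs (pvMinV vs)).2 (pvMinV_le h)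
  have := pvFill_nonneg vs (pvMinV vs)
  omega

-- ---------- the binary search for the fill level ----------
lemma pvSearchL_spec (vs : List Int) (dlt : Int) :
    ∀ (n : ℕ) (lo hi : Int), (hi - lo).toNat ≤ n → pvFill vs lo ≤ dlt → dlt < pvFill vs hi → lo < hi →
      pvFill vs (pvSearchL vs dlt lo hi) ≤ dlt ∧ dlt < pvFill vs (pvSearchL vs dlt lo hi + 1) ∧
      lo ≤ pvSearchL vs dlt lo hi ∧ pvSearchL vs dlt lo hi < hi := by
  intro n
  induction n with
  | zero =>
    intro lo hi hn hlo hhi hlt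
    omega
  | succ n ih =>
    intro lo hi hn hlo hhi hlt
    rw [pvSearchL]
    by_cases hba : hi - lo ≤ 1
    · have hhi1 : hi = lo + 1 := by omega
      simp only [hba, if_true]
      refine ⟨hlo, ?_, le_refl _, by omega⟩
      rw [← hhi1]; exact hhi
    · simp only [hba, if_false]
      have hmid : PySem.Int.floordiv (lo + hi) 2 = (lo + hi) / 2 :=
        PySem.Int.floordiv_eq_ediv_of_pos (by norm_num)
      rw [hmid]
      have hb1 : lo < (lo + hi) / 2 := by omega
      have hb2 : (lo + hi) / 2 < hi := by omega
      by_cases hc : pvFill vs ((lo + hi) / 2) ≤ dlt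
      · simp only [hc, if_true]
        have := ih ((lo + hi) / 2) hi (by omega) hc hhi hb2
        exact ⟨this.1, this.2.1, by omega, this.2.2.2⟩
      · simp only [hc, if_false]
        have := ih lo ((lo + hi) / 2) (by omega) hlo (by omega) hb1
        exact ⟨this.1, this.2.1, this.2.2.1, by omega⟩

lemma pvFillBoundary_unique (vs : List Int) (dlt L1 L2 : Int)
    (h1 : pvFill vs L1 ≤ dlt) (h1' : dlt < pvFill vs (L1 + 1))
    (h2 : pvFill vs L2 ≤ dlt) (h2' : dlt < pvFill vs (L2 + 1)) : L1 = L2 := by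
  rcases lt_trichotomy L1 L2 with h | h | h
  · have := pvFill_monotone vs (show L1 + 1 ≤ L2 by omega)
    omega
  · exact h
  · have := pvFill_monotone vs (show L2 + 1 ≤ L1 by omega)
    omega

-- ---------- the final fill pass ----------
lemma pvApplyFill_congr_mid (l1 l2 : List (Int × Int)) (k x y L : Int)
    (hx : x ≤ L) (hy : y ≤ L) :
    ∀ r, pvApplyFill (l1 ++ (k, x) :: l2) L r = pvApplyFill (l1 ++ (k, y) :: l2) L r := by
  induction l1 with
  | nil =>
    intro r
    simp only [List.nil_append, pvApplyFill]
    rw [if_pos hx, if_pos hy]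
  | cons p t ih =>
    intro r
    simp only [List.cons_append, pvApplyFill]
    split_ifs <;> rw [ih]

lemma pvApplyFill_firstmin (l2 : List (Int × Int)) (k L : Int) :
    ∀ (l1 : List (Int × Int)) (r : Int), (∀ p ∈ l1, L < p.2) → 0 < r →
      pvApplyFill (l1 ++ (k, L) :: l2) L r = pvApplyFill (l1 ++ (k, L + 1) :: l2) L (r - 1) := by
  intro l1
  induction l1 with
  | nil =>
    intro r _ hr
    simp only [List.nil_append, pvApplyFill]
    rw [if_pos (le_refl L), if_pos hr, if_neg (by omega)]
  | cons p t ih =>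
    intro r h hr
    have hp := h p (List.mem_cons_self ..)
    simp only [List.cons_append, pvApplyFill]
    rw [if_neg (by omega), if_neg (by omega), ih r (fun q hq => h q (List.mem_cons_of_mem _ hq)) hr]

lemma pvApplyFill_id {d : List (Int × Int)} {L r : Int} (h : ∀ p ∈ d, L ≤ p.2) (hr : r ≤ 0) :
    pvApplyFill d L r = d := by
  induction d with
  | nil => rfl
  | cons p t ih =>
    have hp := h p (List.mem_cons_self ..)
    have iht := ih (fun q hq => h q (List.mem_cons_of_mem _ hq))
    simp only [pvApplyFill]
    by_cases hle : p.2 ≤ L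
    · rw [if_pos hle, if_neg (by omega), iht]
      have hpL : p.2 = L := le_antisymm hle hp
      rw [← hpL]
    · rw [if_neg hle, iht]

-- ---------- structure of the first minimum ----------
lemma pvMinBy_isMin : ∀ {d : List (Int × Int)} {q : Int × Int}, pvMinBy d = some q → ∀ p ∈ d, q.2 ≤ p.2 := by
  intro d
  induction d with
  | nil => intro q h; simp [pvMinBy] at h
  | cons p t ih =>
    intro q h x hx
    simp only [pvMinBy] at h
    cases hm : pvMinBy t with
    | none =>
      rw [hm] at h; simp at h
      cases t with
      | nil => simp at hx; simp [hx, ← h]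
      | cons a s => simp [pvMinBy] at hm; cases hmm : pvMinBy s <;> rw [hmm] at hm <;> simp at hm <;> split at hm <;> simp_all
    | some q' =>
      rw [hm] at h
      by_cases hc : q'.2 < p.2 <;> simp [hc] at h <;> subst h
      · rcases List.mem_cons.1 hx with rfl | hx
        · omega
        · exact ih hm x hx
      · rcases List.mem_cons.1 hx with rfl | hx
        · exact le_refl _
        · exact le_trans (by omega) (ih hm x hx)

lemma pvMinBy_split : ∀ {d : List (Int × Int)} {q : Int × Int}, pvMinBy d = some q →
    ∃ l1 l2, d = l1 ++ q :: l2 ∧ (∀ p ∈ l1, q.2 < p.2) ∧ (∀ p ∈ l2, q.2 ≤ p.2) := by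
  intro d
  induction d with
  | nil => intro q h; simp [pvMinBy] at h
  | cons p t ih =>
    intro q h
    simp only [pvMinBy] at h
    cases hm : pvMinBy t with
    | none =>
      rw [hm] at h; simp at h
      have ht : t = [] := by
        cases t with
        | nil => rfl
        | cons a s => simp [pvMinBy] at hm; cases hmm : pvMinBy s <;> rw [hmm] at hm <;> simp at hm <;> split at hm <;> simp_all
      exact ⟨[], [], by simp [ht, h], by simp, by simp [ht]⟩
    | some q' =>
      rw [hm] at h
      by_cases hc : q'.2 < p.2 <;> simp [hc] at h <;> subst h
      · obtain ⟨l1, l2, hd, h1, h2⟩ := ih hm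
        exact ⟨p :: l1, l2, by simp [hd], by intro x hx; rcases List.mem_cons.1 hx with rfl | hx; omega; exact h1 x hx, h2⟩
      · exact ⟨[], t, by simp, by simp, fun x hx => le_trans (by omega) (pvMinBy_isMin hm x hx)⟩

lemma pvMinBy_none_iff (d : List (Int × Int)) : pvMinBy d = none ↔ d = [] := by
  cases d with
  | nil => simp [pvMinBy]
  | cons p t => simp only [pvMinBy]; cases pvMinBy t <;> simp <;> split <;> simp

-- ---------- the fill phase in closed form ----------
def pvBodyF (d : List (Int × Int)) (dlt : Int) : List (Int × Int) :=
  pvApplyFill d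
    (pvSearchL (d.map Prod.snd) dlt (pvMinV (d.map Prod.snd)) (pvMinV (d.map Prod.snd) + dlt + 1))
    (dlt - pvFill (d.map Prod.snd)
      (pvSearchL (d.map Prod.snd) dlt (pvMinV (d.map Prod.snd)) (pvMinV (d.map Prod.snd) + dlt + 1)))

def pvFillClosed (d : List (Int × Int)) (total : Int) : List (Int × Int) :=
  if total ≤ pvSumVals d then d else pvBodyF d (total - pvSumVals d)

lemma pvSearchL_at (vs : List Int) (dlt : Int) (hne : vs ≠ []) (hd : 0 ≤ dlt) :
    pvFill vs (pvSearchL vs dlt (pvMinV vs) (pvMinV vs + dlt + 1)) ≤ dlt ∧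
    dlt < pvFill vs (pvSearchL vs dlt (pvMinV vs) (pvMinV vs + dlt + 1) + 1) ∧
    pvMinV vs ≤ pvSearchL vs dlt (pvMinV vs) (pvMinV vs + dlt + 1) := by
  have hlo : pvFill vs (pvMinV vs) ≤ dlt := by rw [pvFill_minV vs hne]; omega
  have hhi : dlt < pvFill vs (pvMinV vs + dlt + 1) := by
    have := pvFill_ge_mem (pvMinV_mem hne) (pvMinV vs + dlt + 1)
    rw [if_pos (by omega)] at this
    omega
  have := pvSearchL_spec vs dlt (dlt + 1).toNat (pvMinV vs) (pvMinV vs + dlt + 1)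
    (by omega) hlo hhi (by omega)
  exact ⟨this.1, this.2.1, this.2.2.1⟩

lemma pvBodyF_nil (dlt : Int) : pvBodyF [] dlt = [] := rfl

lemma pvBodyF_zero {d : List (Int × Int)} (hne : d ≠ []) : pvBodyF d 0 = d := by
  have hvs : d.map Prod.snd ≠ [] := by simpa using hne
  obtain ⟨hL1, hL2, hL3⟩ := pvSearchL_at (d.map Prod.snd) 0 hvs (le_refl 0)
  have hz := pvFill_nonneg (d.map Prod.snd)
    (pvSearchL (d.map Prod.snd) 0 (pvMinV (d.map Prod.snd)) (pvMinV (d.map Prod.snd) + 0 + 1))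
  unfold pvBodyF
  refine pvApplyFill_id ?_ (by omega)
  intro p hp
  exact (pvFill_le_zero_iff _ _).1 (by omega) p.2 (List.mem_map_of_mem hp)

lemma pvBodyF_step {d : List (Int × Int)} {k m dlt : Int}
    (hnd : (d.map Prod.fst).Nodup) (hmin : pvMinBy d = some (k, m)) (hd1 : 1 ≤ dlt) :
    pvBodyF d dlt = pvBodyF (pvModify k (fun v => v + 1) d) (dlt - 1) := by
  obtain ⟨l1, l2, hd, h1, h2⟩ := pvMinBy_split hmin
  have hk1 : k ∉ l1.map Prod.fst := by
    intro hk
    rw [hd, List.map_append, List.map_cons] at hnd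
    exact List.disjoint_of_nodup_append hnd hk (List.mem_cons_self ..)
  have hmod : pvModify k (fun v => v + 1) d = l1 ++ (k, m + 1) :: l2 := by
    rw [hd]; exact pvModify_append _ hk1
  have hall : ∀ p ∈ d, m ≤ p.2 := pvMinBy_isMin hmin
  have hall' : ∀ p ∈ l1 ++ (k, m + 1) :: l2, m ≤ p.2 := by
    intro p hp
    rcases List.mem_append.1 hp with hp | hp
    · exact le_of_lt (h1 p hp)
    · rcases List.mem_cons.1 hp with rfl | hp
      · omega
      · exact h2 p hp
  have hfill : ∀ L, m + 1 ≤ L →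
      pvFill ((l1 ++ (k, m + 1) :: l2).map Prod.snd) L = pvFill (d.map Prod.snd) L - 1 := by
    intro L hL
    rw [hd, pvFill_split, pvFill_split]
    split_ifs <;> omega
  have hvs : d.map Prod.snd ≠ [] := by rw [hd]; simp
  have hvs' : (l1 ++ (k, m + 1) :: l2).map Prod.snd ≠ [] := by simp
  have hfm0 : pvFill (d.map Prod.snd) m = 0 := by
    have := (pvFill_le_zero_iff (d.map Prod.snd) m).2 (by
      intro v hv; obtain ⟨p, hp, rfl⟩ := List.mem_map.1 hv; exact hall p hp)
    have := pvFill_nonneg (d.map Prod.snd) m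
    omega
  have hfm0' : pvFill ((l1 ++ (k, m + 1) :: l2).map Prod.snd) m = 0 := by
    have := (pvFill_le_zero_iff ((l1 ++ (k, m + 1) :: l2).map Prod.snd) m).2 (by
      intro v hv; obtain ⟨p, hp, rfl⟩ := List.mem_map.1 hv; exact hall' p hp)
    have := pvFill_nonneg ((l1 ++ (k, m + 1) :: l2).map Prod.snd) m
    omega
  rw [hmod]
  unfold pvBodyF
  obtain ⟨hA1, hA2, hA3⟩ := pvSearchL_at (d.map Prod.snd) dlt hvs (by omega)
  obtain ⟨hB1, hB2, hB3⟩ :=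
    pvSearchL_at ((l1 ++ (k, m + 1) :: l2).map Prod.snd) (dlt - 1) hvs' (by omega)
  set L := pvSearchL (d.map Prod.snd) dlt (pvMinV (d.map Prod.snd))
    (pvMinV (d.map Prod.snd) + dlt + 1) with hLdef
  set L' := pvSearchL ((l1 ++ (k, m + 1) :: l2).map Prod.snd) (dlt - 1)
    (pvMinV ((l1 ++ (k, m + 1) :: l2).map Prod.snd))
    (pvMinV ((l1 ++ (k, m + 1) :: l2).map Prod.snd) + (dlt - 1) + 1) with hL'def
  have hmL : m ≤ L := by
    have hmem := pvMinV_mem hvs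
    obtain ⟨p, hp, hpv⟩ := List.mem_map.1 hmem
    have := hall p hp
    omega
  have hLbound' : pvFill ((l1 ++ (k, m + 1) :: l2).map Prod.snd) L ≤ dlt - 1 ∧
      dlt - 1 < pvFill ((l1 ++ (k, m + 1) :: l2).map Prod.snd) (L + 1) := by
    constructor
    · by_cases hLm : m + 1 ≤ L
      · rw [hfill L hLm]; omega
      · have : L = m := by omega
        rw [this, hfm0']; omega
    · rw [hfill (L + 1) (by omega)]; omega
  have huniq : L' = L :=
    pvFillBoundary_unique ((l1 ++ (k, m + 1) :: l2).map Prod.snd) (dlt - 1) L' L hB1 hB2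
      hLbound'.1 hLbound'.2
  rw [huniq]
  by_cases hLm : m + 1 ≤ L
  · rw [hfill L hLm]
    have : dlt - 1 - (pvFill (d.map Prod.snd) L - 1) = dlt - pvFill (d.map Prod.snd) L := by omega
    rw [this, hd]
    exact pvApplyFill_congr_mid l1 l2 k m (m + 1) L (by omega) (by omega) _
  · have hLm' : L = m := by omega
    rw [hLm', hfm0, hfm0', hd]
    simp only [sub_zero]
    exact pvApplyFill_firstmin l2 k m l1 dlt (by simpa [hLm'] using h1) (by omega)

-- equation lemmas for the second while loop of A
lemma pvPhase2_of_ge {d : List (Int × Int)} {total : Int} (h : ¬ pvSumVals d < total) :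
    pvPhase2 d total = d := by
  rw [pvPhase2, if_neg h]

lemma pvPhase2_of_none {d : List (Int × Int)} {total : Int} (hmb : pvMinBy d = none) :
    pvPhase2 d total = d := by
  rw [pvPhase2]
  split_ifs with hlt
  · split
    · rfl
    · next q heq => rw [hmb] at heq; cases heq
  · rfl

lemma pvPhase2_of_step {d : List (Int × Int)} {total : Int} {k m : Int}
    (hlt : pvSumVals d < total) (hmb : pvMinBy d = some (k, m)) :
    pvPhase2 d total = pvPhase2 (pvModify k (fun v => v + 1) d) total := by
  conv_lhs => rw [pvPhase2]
  rw [if_pos hlt]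
  split
  · next heq => rw [hmb] at heq; cases heq
  · next q heq => rw [hmb] at heq; injection heq with heq; subst heq; rfl

lemma pvPhase2_eq (total : Int) :
    ∀ (n : ℕ) (d : List (Int × Int)), (total - pvSumVals d).toNat ≤ n →
      (d.map Prod.fst).Nodup → pvPhase2 d total = pvFillClosed d total := by
  intro n
  induction n with
  | zero =>
    intro d hn _
    have hge : total ≤ pvSumVals d := by omega
    rw [pvPhase2_of_ge (by omega), pvFillClosed, if_pos hge]
  | succ n ih =>
    intro d hn hnd
    by_cases hge : total ≤ pvSumVals d
    · rw [pvPhase2_of_ge (by omega), pvFillClosed, if_pos hge]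
    · have hlt : pvSumVals d < total := by omega
      cases hmb : pvMinBy d with
      | none =>
        have hdnil : d = [] := (pvMinBy_none_iff d).1 hmb
        rw [pvPhase2_of_none hmb, pvFillClosed, if_neg hge, hdnil, pvBodyF_nil]
      | some q =>
        obtain ⟨k, m⟩ := q
        have hk : k ∈ d.map Prod.fst := List.mem_map_of_mem (pvMinBy_mem hmb)
        have hsum : pvSumVals (pvModify k (fun v => v + 1) d) = pvSumVals d + 1 :=
          pvSumVals_modify_add hk
        have hnd' : ((pvModify k (fun v => v + 1) d).map Prod.fst).Nodup := by
          rw [pvModify_map_fst]; exact hnd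
        have hne' : pvModify k (fun v => v + 1) d ≠ [] := by
          intro hx
          have := pvModify_map_fst k (fun v => v + 1) d
          rw [hx] at this
          rcases d with _ | ⟨p, t⟩
          · simp [pvMinBy] at hmb
          · simp at this
        rw [pvPhase2_of_step hlt hmb, ih _ (by omega) hnd']
        have hclosed' : pvFillClosed (pvModify k (fun v => v + 1) d) total =
            pvBodyF (pvModify k (fun v => v + 1) d) (total - pvSumVals d - 1) := by
          rw [pvFillClosed]
          split_ifs with h2
          · have he0 : total - pvSumVals d - 1 = 0 := by omega
            rw [he0]
            exact (pvBodyF_zero hne').symm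
          · have : total - pvSumVals (pvModify k (fun v => v + 1) d) = total - pvSumVals d - 1 := by
              omega
            rw [this]
        rw [hclosed', pvFillClosed, if_neg hge]
        exact (pvBodyF_step (dlt := total - pvSumVals d) hnd hmb (by omega)).symm


-- ---------- unfolding the three branches of B ----------
lemma pvAlt_drain {d : List (Int × Int)} {t : Int} (hne : d ≠ []) (hgt : pvSumVals d > t) :
    normalize_allocations_alt d t = pvBodyD d (pvSumVals d - t) := by
  simp only [normalize_allocations_alt, pvBodyD, pvFloorMap]
  rw [if_neg hne, if_pos hgt]

lemma pvAlt_fill {d : List (Int × Int)} {t : Int} (hne : d ≠ []) (hlt : pvSumVals d < t) :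
    normalize_allocations_alt d t = pvBodyF d (t - pvSumVals d) := by
  simp only [normalize_allocations_alt, pvBodyF]
  rw [if_neg hne, if_neg (by omega : ¬ pvSumVals d > t), if_pos hlt]

lemma pvAlt_same {d : List (Int × Int)} {t : Int} (hne : d ≠ []) (heq : pvSumVals d = t) :
    normalize_allocations_alt d t = d := by
  simp only [normalize_allocations_alt]
  rw [if_neg hne, if_neg (by omega : ¬ pvSumVals d > t), if_neg (by omega : ¬ pvSumVals d < t)]

-- ===== VERDICT (by name: the statement is the Claim_ definition above) =====
theorem normalize_allocations_spec : Claim_equal_normalize_allocations := by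
  unfold Claim_equal_normalize_allocations
  intro d t _ hpre
  obtain ⟨hnd, hemp⟩ := hpre
  unfold Spec_normalize_allocations normalize_allocations
  by_cases hne : d = []
  · subst hne
    have ht : t = 0 := hemp rfl
    subst ht
    rw [pvPhase1_of_none (by simp [pvMaxBy])]
    rw [pvPhase2_of_none (by simp [pvMinBy])]
    rfl
  · rcases lt_trichotomy (pvSumVals d) t with hlt | heq | hgt
    · rw [pvPhase1_of_le (by omega)]
      rw [pvPhase2_eq t (t - pvSumVals d).toNat d (le_refl _) hnd]
      rw [pvFillClosed, if_neg (by omega), pvAlt_fill hne hlt]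
    · rw [pvPhase1_of_le (by omega), pvPhase2_of_ge (by omega), pvAlt_same hne heq]
    · have h1 := pvPhase1_eq t (pvSumVals d - t).toNat d (le_refl _) hnd
      have hge := pvSumVals_phase1_ge t (pvSumVals d - t).toNat d (le_refl _) (by omega)
      rw [h1] at hge
      rw [h1, pvPhase2_of_ge (by omega)]
      rw [pvDrainClosed, if_neg (by omega), pvAlt_drain hne hgt]
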